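-- pv_equiv track=rewrite | github.com/tamnd/python-one | scripts/make-docs/preprocess.py | fix_unmatched_braces
-- ===== SOURCE A (Python) =====
-- def fix_unmatched_braces(text: str) -> str:
--     """Remove closing braces that have no matching open brace."""
--     # First pass: collect positions of unmatched '}'
--     depth = 0
--     unmatched = []
--     in_verbatim = False
--     i = 0
--     while i < len(text):
--         # crude verbatim detection: skip \begin{verbatim}...\end{verbatim}
--         if text[i:i+16] == r'\begin{verbatim}':
--             end = text.find(r'\end{verbatim}', i + 16)
--             if end != -1:
--                 i = end + 14
--                 continue
--         if text[i] == '{' and (i == 0 or text[i-1] != '\\'):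
--             depth += 1
--         elif text[i] == '}' and (i == 0 or text[i-1] != '\\'):
--             if depth > 0:
--                 depth -= 1
--             else:
--                 unmatched.append(i)
--         i += 1
--     if not unmatched:
--         return text
--     # Remove unmatched positions (in reverse order to preserve indices)
--     chars = list(text)
--     for pos in reversed(unmatched):
--         chars[pos] = ''
--     return ''.join(chars)
-- ===== SOURCE B (Python) =====
-- def fix_unmatched_braces(text: str) -> str:
--     """Remove closing braces that have no matching open brace."""
--     # Stage 1: tokenize into verbatim blocks, brace tokens, and plain text;
--     # Stage 2: fold over the tokens, emitting everything except closers at depth 0.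
--     depth = 0
--     out = []
--     for kind, payload in _tokenize(text):
--         if kind == 'open':
--             depth += 1
--             out.append(payload)
--         elif kind == 'close':
--             if depth > 0:
--                 depth -= 1
--                 out.append(payload)
--             # an unmatched closer is simply not emitted
--         else:
--             out.append(payload)
--     return ''.join(out)
--
--
-- def _tokenize(text):
--     """Split text into ('open','{'), ('close','}') and ('text', s) tokens.
--
--     A whole \\begin{verbatim}...\\end{verbatim} region becomes one text token;
--     a brace preceded by a backslash is plain text.  The previous character is
--     carried along instead of re-indexing the string."""
--     tokens = []
--     prev = None
--     i = 0
--     n = len(text)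
--     while i < n:
--         if text.startswith(r'\begin{verbatim}', i):
--             end = text.find(r'\end{verbatim}', i + 16)
--             if end != -1:
--                 region = text[i:end + 14]
--                 tokens.append(('text', region))
--                 prev = region[-1]
--                 i = end + 14
--                 continue
--         c = text[i]
--         if c == '{' and prev != '\\':
--             tokens.append(('open', c))
--         elif c == '}' and prev != '\\':
--             tokens.append(('close', c))
--         else:
--             tokens.append(('text', c))
--         prev = c
--         i += 1
--     return tokens
-- ===== Notes on version B (the rewrite author's own statement) =====
-- stated objective: alternative
-- what changed: A collects the indices of unmatched '}' in one index-walking pass and then deletes them by blanking list positions in reverse; B first tokenizes the text into verbatim-block / open / close / plain tokens (tracking the previous character instead of re-indexing) and then folds over the token list with a depth counter, emitting every token except a closer seen at depth 0.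
import Mathlib
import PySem

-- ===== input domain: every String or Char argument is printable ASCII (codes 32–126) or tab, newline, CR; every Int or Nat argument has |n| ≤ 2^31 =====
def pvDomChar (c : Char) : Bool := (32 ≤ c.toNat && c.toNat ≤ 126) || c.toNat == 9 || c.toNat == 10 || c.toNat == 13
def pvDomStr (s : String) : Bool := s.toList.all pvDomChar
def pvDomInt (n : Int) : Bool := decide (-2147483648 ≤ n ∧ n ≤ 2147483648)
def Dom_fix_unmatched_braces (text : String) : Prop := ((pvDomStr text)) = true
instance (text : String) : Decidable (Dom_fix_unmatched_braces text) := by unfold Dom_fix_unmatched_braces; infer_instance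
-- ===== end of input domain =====

-- B tokenizes the text into verbatim-block / open / close / plain tokens and then folds over the
-- token list with a depth counter, emitting everything except closers at depth 0, instead of A's
-- collect-unmatched-indices pass followed by a reversed deletion pass; return values agree everywhere.

-- ===== PORT A =====
def pvVbBegin : List Char := "\\begin{verbatim}".toList
def pvVbEnd : List Char := "\\end{verbatim}".toList

-- facts about the verbatim jump target, used by both ports' termination proofs
theorem pvVbFacts (cs : List Char) (i : Nat) (hi : i < cs.length)
    (h1 : (cs.drop i).take 16 = pvVbBegin)
    (h2 : PySem.Chars.findFrom cs pvVbEnd ((i : Int) + 16) none ≠ -1) :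
    i + 16 ≤ (PySem.Chars.findFrom cs pvVbEnd ((i : Int) + 16) none).toNat ∧
    (PySem.Chars.findFrom cs pvVbEnd ((i : Int) + 16) none).toNat + 14 ≤ cs.length := by
  have hlb : pvVbBegin.length = 16 := by decide
  have hle : pvVbEnd.length = 14 := by decide
  have hlen : i + 16 ≤ cs.length := by
    have h := congrArg List.length h1
    simp only [List.length_take, List.length_drop, hlb] at h
    omega
  have hcast : ((i : Int) + 16) = ((i + 16 : Nat) : Int) := by push_cast; ring
  rw [hcast] at h2 ⊢
  obtain ⟨ha, hb, -⟩ := PySem.Chars.findFrom_natCast_spec cs pvVbEnd (i + 16) hlen h2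
  have hblen := hb.length_le
  rw [List.length_drop, hle] at hblen
  omega

-- text.startswith(r'\begin{verbatim}', i)  ↔  the 16-char window equals the marker
theorem pvPrefix16 (xs : List Char) :
    pvVbBegin.isPrefixOf xs = true ↔ xs.take 16 = pvVbBegin := by
  rw [List.isPrefixOf_iff_prefix, List.prefix_iff_eq_take]
  have h : pvVbBegin.length = 16 := by decide
  rw [h]
  exact ⟨fun h' => h'.symm, fun h' => h'.symm⟩

-- first pass of A: collect indices of unmatched '}' (depth tracking, verbatim skip)
def pvAscan (cs : List Char) (i depth : Nat) (acc : List Nat) : List Nat :=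
  if hi : i < cs.length then
    if hv : (cs.drop i).take 16 = pvVbBegin ∧
        PySem.Chars.findFrom cs pvVbEnd ((i : Int) + 16) none ≠ -1 then
      pvAscan cs ((PySem.Chars.findFrom cs pvVbEnd ((i : Int) + 16) none).toNat + 14) depth acc
    else if cs[i] = '{' ∧ (i = 0 ∨ cs[i-1]'(by omega) ≠ '\\') then
      pvAscan cs (i+1) (depth+1) acc
    else if cs[i] = '}' ∧ (i = 0 ∨ cs[i-1]'(by omega) ≠ '\\') then
      if depth > 0 then pvAscan cs (i+1) (depth-1) acc
      else pvAscan cs (i+1) depth (acc ++ [i])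
    else pvAscan cs (i+1) depth acc
  else acc
termination_by cs.length - i
decreasing_by
  · have h := pvVbFacts cs i hi hv.1 hv.2; omega
  all_goals omega

def fix_unmatched_braces (text : String) : String :=
  let unmatched := pvAscan text.toList 0 0 []
  if unmatched = [] then text
  else
    -- chars = list(text); for pos in reversed(unmatched): chars[pos] = ''; return ''.join(chars)
    PySem.Str.join "" (unmatched.reverse.foldl (fun l p => l.set p "")
      (text.toList.map (fun c => String.ofList [c])))

-- ===== PORT B =====
-- token stream of B's stage 1: ('open', c) / ('close', c) / ('text', s)
inductive PvTok
  | op : Char → PvTok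
  | cl : Char → PvTok
  | txt : List Char → PvTok
deriving DecidableEq, Repr

-- B's tokenizer: verbatim regions become one text token; the previous character is carried along
def pvTokenize (cs : List Char) (i : Nat) (prev : Option Char) : List PvTok :=
  if hi : i < cs.length then
    if hv : pvVbBegin.isPrefixOf (cs.drop i) = true ∧
        PySem.Chars.findFrom cs pvVbEnd ((i : Int) + 16) none ≠ -1 then
      -- region = text[i:end+14] (the slice is exact: i ≤ end+14 ≤ len); prev = region[-1]
      PvTok.txt ((cs.drop i).take ((PySem.Chars.findFrom cs pvVbEnd ((i : Int) + 16) none).toNat + 14 - i)) ::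
        pvTokenize cs ((PySem.Chars.findFrom cs pvVbEnd ((i : Int) + 16) none).toNat + 14)
          (PySem.List.pyGet?
            ((cs.drop i).take ((PySem.Chars.findFrom cs pvVbEnd ((i : Int) + 16) none).toNat + 14 - i)) (-1))
    else if cs[i] = '{' ∧ prev ≠ some '\\' then
      PvTok.op cs[i] :: pvTokenize cs (i+1) (some cs[i])
    else if cs[i] = '}' ∧ prev ≠ some '\\' then
      PvTok.cl cs[i] :: pvTokenize cs (i+1) (some cs[i])
    else
      PvTok.txt [cs[i]] :: pvTokenize cs (i+1) (some cs[i])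
  else []
termination_by cs.length - i
decreasing_by
  · have h := pvVbFacts cs i hi ((pvPrefix16 _).mp hv.1) hv.2; omega
  all_goals omega

-- B's stage 2: fold over the tokens with (depth, out), dropping closers at depth 0
def pvEmit (toks : List PvTok) : List Char :=
  (toks.foldl (fun st tok =>
    match tok with
    | PvTok.op c => (st.1 + 1, st.2 ++ [c])
    | PvTok.cl c => if st.1 > 0 then (st.1 - 1, st.2 ++ [c]) else st
    | PvTok.txt s => (st.1, st.2 ++ s)) ((0 : Nat), ([] : List Char))).2

def fix_unmatched_braces_alt (text : String) : String :=
  String.ofList (pvEmit (pvTokenize text.toList 0 none))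

-- ===== PRECONDITION & SPEC =====
def Spec_fix_unmatched_braces (text : String) (out : String) : Prop := out = fix_unmatched_braces_alt text
instance (text : String) (out : String) : Decidable (Spec_fix_unmatched_braces text out) := by unfold Spec_fix_unmatched_braces; infer_instance

-- ===== CLAIM (what is proved, stated in full; the proofs are below) =====
def Claim_equal_fix_unmatched_braces : Prop := ∀ (text : String), Dom_fix_unmatched_braces text → Spec_fix_unmatched_braces text (fix_unmatched_braces text)

-- ===== LEMMAS AND PROOFS =====

-- proof-side single pass: what the tokenize+fold amounts to, indexed like A's scan
def pvBscan (cs : List Char) (i depth : Nat) : List Char :=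
  if hi : i < cs.length then
    if hv : (cs.drop i).take 16 = pvVbBegin ∧
        PySem.Chars.findFrom cs pvVbEnd ((i : Int) + 16) none ≠ -1 then
      (cs.drop i).take ((PySem.Chars.findFrom cs pvVbEnd ((i : Int) + 16) none).toNat + 14 - i) ++
        pvBscan cs ((PySem.Chars.findFrom cs pvVbEnd ((i : Int) + 16) none).toNat + 14) depth
    else if cs[i] = '{' ∧ (i = 0 ∨ cs[i-1]'(by omega) ≠ '\\') then
      cs[i] :: pvBscan cs (i+1) (depth+1)
    else if cs[i] = '}' ∧ (i = 0 ∨ cs[i-1]'(by omega) ≠ '\\') then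
      if depth > 0 then cs[i] :: pvBscan cs (i+1) (depth-1)
      else pvBscan cs (i+1) depth
    else cs[i] :: pvBscan cs (i+1) depth
  else []
termination_by cs.length - i
decreasing_by
  · have h := pvVbFacts cs i hi hv.1 hv.2; omega
  all_goals omega

-- recursion form of pvEmit's fold
def pvEmitRec : List PvTok → Nat → List Char
  | [], _ => []
  | PvTok.op c :: t, d => c :: pvEmitRec t (d+1)
  | PvTok.cl c :: t, d => if d > 0 then c :: pvEmitRec t (d-1) else pvEmitRec t d
  | PvTok.txt s :: t, d => s ++ pvEmitRec t d

theorem pvEmitFold : ∀ (toks : List PvTok) (d : Nat) (acc : List Char),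
    (toks.foldl (fun st tok =>
      match tok with
      | PvTok.op c => (st.1 + 1, st.2 ++ [c])
      | PvTok.cl c => if st.1 > 0 then (st.1 - 1, st.2 ++ [c]) else st
      | PvTok.txt s => (st.1, st.2 ++ s)) (d, acc)).2 = acc ++ pvEmitRec toks d := by
  intro toks
  induction toks with
  | nil => intro d acc; simp [pvEmitRec]
  | cons tok t ih =>
    intro d acc
    cases tok with
    | op c => simp [List.foldl_cons, pvEmitRec, ih]
    | txt s => simp [List.foldl_cons, pvEmitRec, ih]
    | cl c =>
      by_cases hd : d > 0
      · simp [List.foldl_cons, pvEmitRec, hd, ih]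
      · simp [List.foldl_cons, pvEmitRec, hd, ih]

-- invariant carried by the tokenizer's prev parameter
def pvPrevOk (cs : List Char) (i : Nat) (prev : Option Char) : Prop :=
  (i = 0 ∧ prev = none) ∨ (∃ h : i - 1 < cs.length, 0 < i ∧ prev = some (cs[i-1]))

theorem pvPrevGuard (cs : List Char) (i : Nat) (prev : Option Char)
    (him : i - 1 < cs.length) (hp : pvPrevOk cs i prev) :
    (prev ≠ some '\\') ↔ (i = 0 ∨ cs[i-1]'him ≠ '\\') := by
  rcases hp with ⟨h0, hn⟩ | ⟨h, hpos, he⟩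
  · subst h0 hn; simp
  · subst he
    constructor
    · intro hne
      right; intro hc
      exact hne (congrArg some hc)
    · intro hor hc
      rcases hor with h0 | hne
      · omega
      · exact hne (Option.some.inj hc)

theorem pvTokBscan : ∀ (n : Nat) (cs : List Char) (i : Nat) (prev : Option Char) (d : Nat),
    cs.length - i ≤ n → pvPrevOk cs i prev →
    pvEmitRec (pvTokenize cs i prev) d = pvBscan cs i d := by
  intro n
  induction n with
  | zero =>
    intro cs i prev d h hp
    rw [pvTokenize, pvBscan]
    have hni : ¬ i < cs.length := by omega
    simp [hni, pvEmitRec]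
  | succ n ih =>
    intro cs i prev d h hp
    rw [pvTokenize, pvBscan]
    by_cases hi : i < cs.length
    · simp only [dif_pos hi]
      by_cases hvb : (cs.drop i).take 16 = pvVbBegin ∧
          PySem.Chars.findFrom cs pvVbEnd ((i : Int) + 16) none ≠ -1
      · -- verbatim region
        rw [dif_pos ⟨(pvPrefix16 _).mpr hvb.1, hvb.2⟩, dif_pos hvb]
        obtain ⟨hge, hle⟩ := pvVbFacts cs i hi hvb.1 hvb.2
        set e := (PySem.Chars.findFrom cs pvVbEnd ((i : Int) + 16) none).toNat with he
        simp only [pvEmitRec]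
        congr 1
        apply ih cs (e+14) _ d (by omega)
        -- prev for the next step is region[-1] = cs[e+13]
        have hlen : ((cs.drop i).take (e + 14 - i)).length = e + 14 - i := by
          simp [List.length_take, List.length_drop]; omega
        have hlast : PySem.List.pyGet? ((cs.drop i).take (e + 14 - i)) (-1) = some (cs[e+13]'(by omega)) := by
          rw [PySem.List.pyGet?_neg_one, List.getLast?_eq_getElem?, hlen]
          have hidx : e + 14 - i - 1 < ((cs.drop i).take (e + 14 - i)).length := by omega
          rw [List.getElem?_eq_getElem hidx]
          congr 1
          rw [List.getElem_take, List.getElem_drop]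
          congr 1
          omega
        right
        exact ⟨by omega, by omega, by rw [hlast]; congr 1⟩
      · rw [dif_neg (fun hc => hvb ⟨(pvPrefix16 _).mp hc.1, hc.2⟩), dif_neg hvb]
        have him : i - 1 < cs.length := by omega
        have hguard := pvPrevGuard cs i prev him hp
        have hprev' : pvPrevOk cs (i+1) (some (cs[i]'hi)) := by
          right
          exact ⟨by simpa using hi, by omega, by simp⟩
        by_cases h1 : cs[i]'hi = '{' ∧ (i = 0 ∨ cs[i-1]'him ≠ '\\')
        · rw [if_pos (⟨h1.1, hguard.mpr h1.2⟩ : _ ∧ prev ≠ some '\\'), if_pos h1]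
          simp only [pvEmitRec]
          rw [ih cs (i+1) _ (d+1) (by omega) hprev']
        · rw [if_neg (fun hc => h1 ⟨hc.1, hguard.mp hc.2⟩), if_neg h1]
          by_cases h2 : cs[i]'hi = '}' ∧ (i = 0 ∨ cs[i-1]'him ≠ '\\')
          · rw [if_pos (⟨h2.1, hguard.mpr h2.2⟩ : _ ∧ prev ≠ some '\\'), if_pos h2]
            by_cases hd : d > 0
            · simp only [pvEmitRec]
              rw [if_pos hd, if_pos hd, ih cs (i+1) _ (d-1) (by omega) hprev']
            · simp only [pvEmitRec]
              rw [if_neg hd, if_neg hd, ih cs (i+1) _ d (by omega) hprev']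
          · rw [if_neg (fun hc => h2 ⟨hc.1, hguard.mp hc.2⟩), if_neg h2]
            simp only [pvEmitRec, List.singleton_append]
            rw [ih cs (i+1) _ d (by omega) hprev']
    · simp [hi, pvEmitRec]

-- cs with the characters at the indices in ps removed, indexing from i
def pvMask : List Char → List Nat → Nat → List Char
  | [], _, _ => []
  | c :: t, ps, i => (if i ∈ ps then [] else [c]) ++ pvMask t ps (i+1)

theorem pvMask_nil : ∀ (t : List Char) (i : Nat), pvMask t [] i = t := by
  intro t
  induction t with
  | nil => intro i; rfl
  | cons c t ih => intro i; simp [pvMask, ih]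

theorem pvMask_congr : ∀ (t : List Char) (i : Nat) (ps qs : List Nat),
    (∀ j, i ≤ j → (j ∈ ps ↔ j ∈ qs)) → pvMask t ps i = pvMask t qs i := by
  intro t
  induction t with
  | nil => intros; rfl
  | cons c t ih =>
    intro i ps qs h
    simp only [pvMask]
    rw [ih (i+1) ps qs (fun j hj => h j (by omega))]
    have hiq := h i le_rfl
    by_cases hm : i ∈ ps
    · simp [hm, hiq.mp hm]
    · have hq : i ∉ qs := fun hq => hm (hiq.mpr hq)
      simp [hm, hq]

theorem pvMask_skip : ∀ (k : Nat) (cs : List Char) (ps : List Nat) (i : Nat),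
    i + k ≤ cs.length → (∀ p ∈ ps, i + k ≤ p) →
    pvMask (cs.drop i) ps i = (cs.drop i).take k ++ pvMask (cs.drop (i + k)) ps (i + k) := by
  intro k
  induction k with
  | zero => intro cs ps i h hp; simp
  | succ k ih =>
    intro cs ps i h hp
    have hi : i < cs.length := by omega
    have hnot : i ∉ ps := fun hm => by have := hp i hm; omega
    have hrec := ih cs ps (i+1) (by omega) (fun p hp' => by have := hp p hp'; omega)
    rw [List.drop_eq_getElem_cons hi]
    simp only [pvMask, if_neg hnot, List.take_succ_cons]
    rw [show i + 1 + k = i + (k + 1) by omega] at hrec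
    simp [hrec]

theorem pvAscan_acc : ∀ (n : Nat) (cs : List Char) (i depth : Nat) (acc : List Nat),
    cs.length - i ≤ n →
    pvAscan cs i depth acc = acc ++ pvAscan cs i depth [] := by
  intro n
  induction n with
  | zero =>
    intro cs i d acc h
    conv_lhs => rw [pvAscan]
    conv_rhs => rw [pvAscan]
    have hni : ¬ i < cs.length := by omega
    simp [hni]
  | succ n ih =>
    intro cs i d acc h
    conv_lhs => rw [pvAscan]
    conv_rhs => rw [pvAscan]
    by_cases hi : i < cs.length
    · simp only [dif_pos hi]
      split_ifs with hv h1 h2 h3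
      · exact ih cs _ d acc (by have := pvVbFacts cs i hi hv.1 hv.2; omega)
      · exact ih cs (i+1) (d+1) acc (by omega)
      · exact ih cs (i+1) (d-1) acc (by omega)
      · rw [ih cs (i+1) d (acc ++ [i]) (by omega), ih cs (i+1) d ([] ++ [i]) (by omega)]
        simp
      · exact ih cs (i+1) d acc (by omega)
    · simp [hi]

theorem pvAscan_mem : ∀ (n : Nat) (cs : List Char) (i depth : Nat) (acc : List Nat) (p : Nat),
    cs.length - i ≤ n → p ∈ pvAscan cs i depth acc →
    p ∈ acc ∨ (i ≤ p ∧ p < cs.length) := by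
  intro n
  induction n with
  | zero =>
    intro cs i d acc p h hp
    rw [pvAscan] at hp
    have hni : ¬ i < cs.length := by omega
    rw [dif_neg hni] at hp
    exact Or.inl hp
  | succ n ih =>
    intro cs i d acc p h hp
    rw [pvAscan] at hp
    by_cases hi : i < cs.length
    · rw [dif_pos hi] at hp
      split_ifs at hp with hv h1 h2 h3
      · have hf := pvVbFacts cs i hi hv.1 hv.2
        rcases ih cs _ d acc p (by omega) hp with h' | h'
        · exact Or.inl h'
        · exact Or.inr (by omega)
      · rcases ih cs (i+1) (d+1) acc p (by omega) hp with h' | h'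
        · exact Or.inl h'
        · exact Or.inr (by omega)
      · rcases ih cs (i+1) (d-1) acc p (by omega) hp with h' | h'
        · exact Or.inl h'
        · exact Or.inr (by omega)
      · rcases ih cs (i+1) d (acc ++ [i]) p (by omega) hp with h' | h'
        · rcases List.mem_append.mp h' with h'' | h''
          · exact Or.inl h''
          · have : p = i := by simpa using h''
            exact Or.inr (by omega)
        · exact Or.inr (by omega)
      · rcases ih cs (i+1) d acc p (by omega) hp with h' | h'
        · exact Or.inl h'
        · exact Or.inr (by omega)
    · rw [dif_neg hi] at hp
      exact Or.inl hp

theorem pvNotMemNext (cs : List Char) (i depth : Nat) :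
    i ∉ pvAscan cs (i+1) depth [] := by
  intro hm
  rcases pvAscan_mem cs.length cs (i+1) depth [] i (by omega) hm with h | h
  · simp at h
  · omega

theorem pvMain : ∀ (n : Nat) (cs : List Char) (i depth : Nat),
    cs.length - i ≤ n →
    pvBscan cs i depth = pvMask (cs.drop i) (pvAscan cs i depth []) i := by
  intro n
  induction n with
  | zero =>
    intro cs i d h
    conv_lhs => rw [pvBscan]
    conv_rhs => rw [pvAscan]
    have hni : ¬ i < cs.length := by omega
    rw [List.drop_eq_nil_of_le (by omega)]
    simp [hni, pvMask]
  | succ n ih =>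
    intro cs i d h
    conv_lhs => rw [pvBscan]
    conv_rhs => rw [pvAscan]
    by_cases hi : i < cs.length
    · simp only [dif_pos hi]
      split_ifs with hv h1 h2 h3
      · -- verbatim region: skip it wholesale
        obtain ⟨hge, hle⟩ := pvVbFacts cs i hi hv.1 hv.2
        set e := (PySem.Chars.findFrom cs pvVbEnd ((i : Int) + 16) none).toNat with he
        have hmem : ∀ p ∈ pvAscan cs (e+14) d [], i + (e + 14 - i) ≤ p := by
          intro p hp
          rcases pvAscan_mem cs.length cs (e+14) d [] p (by omega) hp with h' | h'
          · simp at h'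
          · omega
        have hskip := pvMask_skip (e + 14 - i) cs (pvAscan cs (e+14) d []) i (by omega) hmem
        rw [show i + (e + 14 - i) = e + 14 by omega] at hskip
        rw [hskip]
        congr 1
        exact ih cs (e+14) d (by omega)
      · -- unescaped '{'
        rw [List.drop_eq_getElem_cons hi]
        simp only [pvMask, if_neg (pvNotMemNext cs i (d+1))]
        simp [ih cs (i+1) (d+1) (by omega)]
      · -- matched '}'
        rw [List.drop_eq_getElem_cons hi]
        simp only [pvMask, if_neg (pvNotMemNext cs i (d-1))]
        simp [ih cs (i+1) (d-1) (by omega)]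
      · -- unmatched '}': A records index i, B drops the character
        rw [List.drop_eq_getElem_cons hi]
        have hacc := pvAscan_acc cs.length cs (i+1) d ([] ++ [i]) (by omega)
        rw [hacc]
        simp only [pvMask, List.nil_append]
        rw [if_pos (by simp)]
        rw [pvMask_congr (cs.drop (i+1)) (i+1) ([i] ++ pvAscan cs (i+1) d []) (pvAscan cs (i+1) d [])
          (fun j hj => by
            simp only [List.cons_append, List.nil_append, List.mem_cons]
            constructor
            · rintro (rfl | h')
              · omega
              · exact h'
            · exact Or.inr)]
        simpa using ih cs (i+1) d (by omega)
      · -- ordinary character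
        rw [List.drop_eq_getElem_cons hi]
        simp only [pvMask, if_neg (pvNotMemNext cs i d)]
        simp [ih cs (i+1) d (by omega)]
    · rw [List.drop_eq_nil_of_le (by omega)]
      simp [hi, pvMask]

-- the strings version of pvMask: what A's set-to-'' loop produces
def pvMaskS : List Char → List Nat → Nat → List String
  | [], _, _ => []
  | c :: t, ps, i => (if i ∈ ps then "" else String.ofList [c]) :: pvMaskS t ps (i+1)

theorem pvMaskS_length : ∀ (cs : List Char) (ps : List Nat) (i : Nat),
    (pvMaskS cs ps i).length = cs.length := by
  intro cs
  induction cs with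
  | nil => intros; rfl
  | cons c t ih => intro ps i; simp [pvMaskS, ih]

theorem pvFoldlSetLen : ∀ (ps : List Nat) (F : List String),
    (ps.foldl (fun l p => l.set p "") F).length = F.length := by
  intro ps
  induction ps with
  | nil => intros; rfl
  | cons p ps ih => intro F; simp [List.foldl_cons, ih]

theorem pvFoldlSetGet : ∀ (ps : List Nat) (F : List String) (j : Nat) (hj : j < F.length),
    (ps.foldl (fun l p => l.set p "") F)[j]'(by rw [pvFoldlSetLen]; exact hj) =
      if j ∈ ps then "" else F[j] := by
  intro ps
  induction ps with
  | nil => intros; simp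
  | cons p ps ih =>
    intro F j hj
    simp only [List.foldl_cons]
    have hj' : j < (F.set p "").length := by simpa using hj
    rw [ih (F.set p "") j hj']
    by_cases hm : j ∈ ps
    · simp [hm]
    · simp only [hm, if_false]
      rw [List.getElem_set]
      by_cases hpj : p = j
      · subst hpj; simp
      · simp only [hpj, if_false, List.mem_cons]
        rw [if_neg (by tauto)]

theorem pvMaskS_get : ∀ (cs : List Char) (i j : Nat) (ps : List Nat) (h : j < cs.length),
    (pvMaskS cs ps i)[j]'(by rw [pvMaskS_length]; exact h) =
      if (i + j) ∈ ps then "" else String.ofList [cs[j]] := by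
  intro cs
  induction cs with
  | nil => intro i j ps h; simp at h
  | cons c t ih =>
    intro i j ps h
    cases j with
    | zero => simp [pvMaskS]
    | succ j =>
      simp only [pvMaskS, List.getElem_cons_succ]
      rw [ih (i+1) j ps (by simpa using h)]
      rw [show i + 1 + j = i + (j + 1) by omega]

theorem pvFoldEqMaskS : ∀ (cs : List Char) (ps : List Nat),
    ps.foldl (fun l p => l.set p "") (cs.map (fun c => String.ofList [c])) = pvMaskS cs ps 0 := by
  intro cs ps
  apply List.ext_getElem
  · rw [pvFoldlSetLen, pvMaskS_length, List.length_map]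
  · intro j h1 h2
    have hj : j < (cs.map (fun c => String.ofList [c])).length := by
      rw [pvFoldlSetLen] at h1; exact h1
    rw [pvFoldlSetGet ps _ j hj]
    have hjc : j < cs.length := by simpa using hj
    rw [pvMaskS_get cs 0 j ps hjc]
    simp

theorem pvMaskS_flatten : ∀ (cs : List Char) (ps : List Nat) (i : Nat),
    ((pvMaskS cs ps i).map String.toList).flatten = pvMask cs ps i := by
  intro cs
  induction cs with
  | nil => intros; rfl
  | cons c t ih =>
    intro ps i
    simp only [pvMaskS, pvMask, List.map_cons, List.flatten_cons, ih]
    by_cases hm : i ∈ ps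
    · simp [hm]
    · simp [hm]

theorem pvJoinNil : ∀ (xs : List (List Char)), PySem.Chars.join [] xs = xs.flatten := by
  intro xs
  simp only [PySem.Chars.join]
  induction xs with
  | nil => simp [List.intercalate]
  | cons a t ih =>
    cases t with
    | nil => simp [List.intercalate]
    | cons b u =>
      simp only [List.intercalate, List.intersperse_cons₂, List.flatten_cons] at ih ⊢
      simp [ih]

-- ===== VERDICT (by name: the statement is the Claim_ definition above) =====
theorem fix_unmatched_braces_spec : Claim_equal_fix_unmatched_braces := by
  intro text _
  unfold Spec_fix_unmatched_braces fix_unmatched_braces fix_unmatched_braces_alt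
  set cs := text.toList with hcs
  set U := pvAscan cs 0 0 [] with hU
  have halt : pvEmit (pvTokenize cs 0 none) = pvBscan cs 0 0 := by
    unfold pvEmit
    rw [pvEmitFold]
    rw [pvTokBscan cs.length cs 0 none 0 (by omega) (Or.inl ⟨rfl, rfl⟩)]
    simp
  rw [halt]
  have hmain : pvBscan cs 0 0 = pvMask cs U 0 := by
    have h := pvMain cs.length cs 0 0 (by omega)
    simpa using h
  by_cases h0 : U = []
  · rw [if_pos h0, hmain, h0, pvMask_nil]
    simp [hcs]
  · rw [if_neg h0]
    apply String.toList_inj.mp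
    rw [PySem.Str.toList_join]
    rw [pvFoldEqMaskS cs U.reverse]
    rw [show ("" : String).toList = [] from rfl]
    rw [pvJoinNil]
    rw [pvMaskS_flatten]
    rw [pvMask_congr cs 0 U.reverse U (fun j _ => List.mem_reverse)]
    rw [← hmain]
    simp
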